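-- pv_equiv track=rewrite | github.com/anthonynagle1/livite-sports-outreach | tools/rematch_contacts.py | match_contact_from_staff
-- ===== SOURCE A (Python) =====
-- def match_contact_from_staff(staff):
--     """Find best contact from staff list using priority matching."""
--     if not staff:
--         return None
--
--     # Priority titles
--     priority_titles = [
--         'director of operations',
--         'assistant coach',
--         'associate head',
--         'head coach'
--     ]
--
--     for priority_title in priority_titles:
--         for member in staff:
--             title = member.get('title', '').lower()
--             email = member.get('email', '')
--             if priority_title in title and email and email != 'Not Found' and '@' in email:
--                 return member
--
--     # Fallback: any staff with email
--     for member in staff: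
--         email = member.get('email', '')
--         if email and email != 'Not Found' and '@' in email:
--             return member
--
--     return None
-- ===== SOURCE B (Python) =====
-- def match_contact_from_staff(staff):
--     """Find best contact from staff list using priority matching."""
--     priority_titles = [
--         'director of operations',
--         'assistant coach',
--         'associate head',
--         'head coach',
--     ]
--     best = None
--     best_rank = None
--     for member in staff:
--         email = member.get('email', '')
--         if not email or email == 'Not Found' or '@' not in email:
--             continue
--         title = member.get('title', '').lower()
--         rank = 4
--         for i, pt in enumerate(priority_titles):
--             if pt in title:
--                 rank = i
--                 break
--         if best_rank is None or rank < best_rank: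
--             best = member
--             best_rank = rank
--     return best
-- ===== Notes on version B (the rewrite author's own statement) =====
-- stated objective: alternative
-- what changed: Replaced A's four per-title passes over staff plus a fallback pass by a single pass that computes each valid-email member's priority rank (smallest matching title index, 4 if none) and keeps the strictly-best-ranked earliest member.
import Mathlib
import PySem

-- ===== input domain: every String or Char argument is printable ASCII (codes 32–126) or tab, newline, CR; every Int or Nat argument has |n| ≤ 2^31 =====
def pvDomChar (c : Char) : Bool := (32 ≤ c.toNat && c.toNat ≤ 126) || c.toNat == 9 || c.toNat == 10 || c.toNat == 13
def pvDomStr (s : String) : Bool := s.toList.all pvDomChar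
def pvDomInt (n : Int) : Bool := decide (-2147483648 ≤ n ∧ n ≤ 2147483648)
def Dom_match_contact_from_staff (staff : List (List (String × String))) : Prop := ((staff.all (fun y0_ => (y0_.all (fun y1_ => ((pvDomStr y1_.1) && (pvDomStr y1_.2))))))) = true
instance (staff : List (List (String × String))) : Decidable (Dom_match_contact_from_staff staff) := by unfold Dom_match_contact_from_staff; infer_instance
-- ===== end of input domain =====

-- B replaces A's four priority-title passes plus a fallback pass by one pass keeping the best-ranked member (alternative decomposition, same result).

-- ===== PORT A =====
-- predicate of A's inner loop for one priority title
def pvAPred (pt : String) (m : List (String × String)) : Bool :=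
  PySem.Str.isIn pt (PySem.Str.lower (PySem.Dict.getD (PySem.Dict.mk m) "title" "")) &&
  !(PySem.Dict.getD (PySem.Dict.mk m) "email" "" == "") &&
  !(PySem.Dict.getD (PySem.Dict.mk m) "email" "" == "Not Found") &&
  PySem.Str.isIn "@" (PySem.Dict.getD (PySem.Dict.mk m) "email" "")

-- predicate of A's fallback loop
def pvAFallbackPred (m : List (String × String)) : Bool :=
  !(PySem.Dict.getD (PySem.Dict.mk m) "email" "" == "") &&
  !(PySem.Dict.getD (PySem.Dict.mk m) "email" "" == "Not Found") &&
  PySem.Str.isIn "@" (PySem.Dict.getD (PySem.Dict.mk m) "email" "")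

-- 'for priority_title in priority_titles: for member in staff: … return member'
def pvATitleLoop (staff : List (List (String × String))) : List String → Option (List (String × String))
  | [] => none
  | pt :: rest =>
    match staff.find? (pvAPred pt) with
    | some m => some m
    | none => pvATitleLoop staff rest

def match_contact_from_staff (staff : List (List (String × String))) : Option (List (String × String)) :=
  if staff.isEmpty then none
  else
    match pvATitleLoop staff ["director of operations", "assistant coach", "associate head", "head coach"] with
    | some m => some m
    | none => staff.find? pvAFallbackPred

-- ===== PORT B =====
def pvBPriorityTitles : List String :=
  ["director of operations", "assistant coach", "associate head", "head coach"]

-- 'rank = 4; for i, pt in enumerate(priority_titles): if pt in title: rank = i; break'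
def pvBRankLoop (title : String) : List (Int × String) → Int
  | [] => 4
  | (i, pt) :: rest => if PySem.Str.isIn pt title then i else pvBRankLoop title rest

-- body of B's single pass: state = (best, best_rank)
def pvBStep (st : Option (List (String × String)) × Option Int) (m : List (String × String)) :
    Option (List (String × String)) × Option Int :=
  let email := PySem.Dict.getD (PySem.Dict.mk m) "email" ""
  if email == "" || email == "Not Found" || !(PySem.Str.isIn "@" email) then st
  else
    let title := PySem.Str.lower (PySem.Dict.getD (PySem.Dict.mk m) "title" "")
    let rank := pvBRankLoop title (PySem.List.enumerate pvBPriorityTitles)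
    match st.2 with
    | none => (some m, some rank)
    | some br => if rank < br then (some m, some rank) else st

def match_contact_from_staff_alt (staff : List (List (String × String))) : Option (List (String × String)) :=
  (staff.foldl pvBStep (none, none)).1

-- ===== PRECONDITION & SPEC =====
def Spec_match_contact_from_staff (staff : List (List (String × String))) (out : Option (List (String × String))) : Prop := out = match_contact_from_staff_alt staff
instance (staff : List (List (String × String))) (out : Option (List (String × String))) : Decidable (Spec_match_contact_from_staff staff out) := by unfold Spec_match_contact_from_staff; infer_instance

-- ===== CLAIM (what is proved, stated in full; the proofs are below) =====
def Claim_equal_match_contact_from_staff : Prop := ∀ (staff : List (List (String × String))), Dom_match_contact_from_staff staff → Spec_match_contact_from_staff staff (match_contact_from_staff staff)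

-- ===== LEMMAS AND PROOFS =====

-- proof-side: the rank of a member (B's inner loop) and the best (member, rank) of a list
def pvRank (m : List (String × String)) : Int :=
  pvBRankLoop (PySem.Str.lower (PySem.Dict.getD (PySem.Dict.mk m) "title" "")) (PySem.List.enumerate pvBPriorityTitles)

def pvPick : List (List (String × String)) → Option (List (String × String) × Int)
  | [] => none
  | m :: rest =>
    if pvAFallbackPred m then
      match pvPick rest with
      | some (m', r') => if r' < pvRank m then some (m', r') else some (m, pvRank m)
      | none => some (m, pvRank m)
    else pvPick rest

theorem pvEnum_eq : PySem.List.enumerate pvBPriorityTitles =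
    [(0, "director of operations"), (1, "assistant coach"), (2, "associate head"), (3, "head coach")] := by
  decide

theorem pvRank_le (m : List (String × String)) : pvRank m ≤ 4 := by
  unfold pvRank
  rw [pvEnum_eq]
  simp only [pvBRankLoop]
  split_ifs <;> omega

theorem pvRank_nonneg (m : List (String × String)) : 0 ≤ pvRank m := by
  unfold pvRank
  rw [pvEnum_eq]
  simp only [pvBRankLoop]
  split_ifs <;> omega

theorem pvBStep_eq (st : Option (List (String × String)) × Option Int) (m : List (String × String)) :
    pvBStep st m = if pvAFallbackPred m then
      (match st.2 with
        | none => (some m, some (pvRank m))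
        | some br => if pvRank m < br then (some m, some (pvRank m)) else st)
      else st := by
  unfold pvBStep pvAFallbackPred pvRank
  by_cases h1 : (PySem.Dict.getD (PySem.Dict.mk m) "email" "" == "") = true <;>
    by_cases h2 : (PySem.Dict.getD (PySem.Dict.mk m) "email" "" == "Not Found") = true <;>
    by_cases h3 : (PySem.Str.isIn "@" (PySem.Dict.getD (PySem.Dict.mk m) "email" "")) = true <;>
    simp_all

theorem pvAPred_false (pt : String) (m : List (String × String))
    (h : pvAFallbackPred m = false) : pvAPred pt m = false := by
  unfold pvAPred
  unfold pvAFallbackPred at h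
  simp only [Bool.and_eq_false_iff] at h ⊢
  tauto

theorem pvAPred_iff0 (m : List (String × String)) :
    pvAPred "director of operations" m = true ↔ (pvAFallbackPred m = true ∧ pvRank m = 0) := by
  unfold pvAPred pvAFallbackPred pvRank
  rw [pvEnum_eq]
  simp only [pvBRankLoop]
  by_cases h0 : PySem.Str.isIn "director of operations" (PySem.Str.lower (PySem.Dict.getD (PySem.Dict.mk m) "title" "")) = true <;>
    simp_all <;> split_ifs <;> omega

theorem pvAPred_iff1 (m : List (String × String))
    (h : pvAFallbackPred m = true → 1 ≤ pvRank m) :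
    pvAPred "assistant coach" m = true ↔ (pvAFallbackPred m = true ∧ pvRank m = 1) := by
  unfold pvAPred pvAFallbackPred pvRank at *
  rw [pvEnum_eq] at *
  simp only [pvBRankLoop] at *
  by_cases h0 : PySem.Str.isIn "director of operations" (PySem.Str.lower (PySem.Dict.getD (PySem.Dict.mk m) "title" "")) = true <;>
    by_cases h1 : PySem.Str.isIn "assistant coach" (PySem.Str.lower (PySem.Dict.getD (PySem.Dict.mk m) "title" "")) = true <;>
    simp_all <;> omega

theorem pvAPred_iff2 (m : List (String × String))
    (h : pvAFallbackPred m = true → 2 ≤ pvRank m) :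
    pvAPred "associate head" m = true ↔ (pvAFallbackPred m = true ∧ pvRank m = 2) := by
  unfold pvAPred pvAFallbackPred pvRank at *
  rw [pvEnum_eq] at *
  simp only [pvBRankLoop] at *
  by_cases h0 : PySem.Str.isIn "director of operations" (PySem.Str.lower (PySem.Dict.getD (PySem.Dict.mk m) "title" "")) = true <;>
    by_cases h1 : PySem.Str.isIn "assistant coach" (PySem.Str.lower (PySem.Dict.getD (PySem.Dict.mk m) "title" "")) = true <;>
    by_cases h2 : PySem.Str.isIn "associate head" (PySem.Str.lower (PySem.Dict.getD (PySem.Dict.mk m) "title" "")) = true <;>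
    simp_all <;> omega

theorem pvAPred_iff3 (m : List (String × String))
    (h : pvAFallbackPred m = true → 3 ≤ pvRank m) :
    pvAPred "head coach" m = true ↔ (pvAFallbackPred m = true ∧ pvRank m = 3) := by
  unfold pvAPred pvAFallbackPred pvRank at *
  rw [pvEnum_eq] at *
  simp only [pvBRankLoop] at *
  by_cases h0 : PySem.Str.isIn "director of operations" (PySem.Str.lower (PySem.Dict.getD (PySem.Dict.mk m) "title" "")) = true <;>
    by_cases h1 : PySem.Str.isIn "assistant coach" (PySem.Str.lower (PySem.Dict.getD (PySem.Dict.mk m) "title" "")) = true <;>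
    by_cases h2 : PySem.Str.isIn "associate head" (PySem.Str.lower (PySem.Dict.getD (PySem.Dict.mk m) "title" "")) = true <;>
    by_cases h3 : PySem.Str.isIn "head coach" (PySem.Str.lower (PySem.Dict.getD (PySem.Dict.mk m) "title" "")) = true <;>
    simp_all <;> omega

theorem pvPick_mem (staff : List (List (String × String))) (m : List (String × String)) (r : Int)
    (h : pvPick staff = some (m, r)) : m ∈ staff ∧ pvAFallbackPred m = true := by
  induction staff generalizing m r with
  | nil => simp [pvPick] at h
  | cons x rest ih =>
    simp only [pvPick] at h
    by_cases hx : pvAFallbackPred x = true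
    · simp only [hx, if_pos] at h
      rcases hrest : pvPick rest with _ | ⟨m'', r''⟩ <;> simp only [hrest] at h
      · cases h; exact ⟨by simp, hx⟩
      · split_ifs at h <;> cases h
        · have := ih _ _ hrest; exact ⟨List.mem_cons_of_mem _ this.1, this.2⟩
        · exact ⟨by simp, hx⟩
    · simp only [hx] at h
      simp at h
      have := ih _ _ h
      exact ⟨List.mem_cons_of_mem _ this.1, this.2⟩

theorem pvPick_none (staff : List (List (String × String))) (h : pvPick staff = none) :
    ∀ m ∈ staff, pvAFallbackPred m = false := by
  induction staff with
  | nil => simp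
  | cons x rest ih =>
    simp only [pvPick] at h
    by_cases hx : pvAFallbackPred x = true
    · simp only [hx, if_pos] at h
      rcases hrest : pvPick rest with _ | p <;> simp only [hrest] at h
      · simp at h
      · split_ifs at h
    · simp only [hx] at h
      simp at h
      intro m hm
      rcases List.mem_cons.mp hm with h1 | h1
      · subst h1; simpa using hx
      · exact ih h m h1

theorem pvPick_min (staff : List (List (String × String))) (m : List (String × String)) (r : Int)
    (h : pvPick staff = some (m, r)) :
    ∀ m' ∈ staff, pvAFallbackPred m' = true → r ≤ pvRank m' := by
  induction staff generalizing m r with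
  | nil => simp [pvPick] at h
  | cons x rest ih =>
    simp only [pvPick] at h
    intro m' hm' hv'
    by_cases hx : pvAFallbackPred x = true
    · simp only [hx, if_pos] at h
      rcases hrest : pvPick rest with _ | ⟨m'', r''⟩ <;> simp only [hrest] at h
      · cases h
        rcases List.mem_cons.mp hm' with h1 | h1
        · subst h1; omega
        · exact absurd (pvPick_none rest hrest m' h1) (by simp [hv'])
      · have hmin'' := ih m'' r'' hrest
        rcases List.mem_cons.mp hm' with h1 | h1
        · subst h1
          split_ifs at h <;> cases h <;> omega
        · have := hmin'' m' h1 hv'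
          split_ifs at h <;> cases h <;> omega
    · simp only [hx] at h
      simp at h
      rcases List.mem_cons.mp hm' with h1 | h1
      · subst h1; exact absurd hv' (by simp [hx])
      · exact ih m r h m' h1 hv' 

theorem pvPick_rank (staff : List (List (String × String))) (m : List (String × String)) (r : Int)
    (h : pvPick staff = some (m, r)) : pvRank m = r := by
  induction staff generalizing m r with
  | nil => simp [pvPick] at h
  | cons x rest ih =>
    simp only [pvPick] at h
    by_cases hx : pvAFallbackPred x = true
    · simp only [hx, if_pos] at h
      rcases hrest : pvPick rest with _ | ⟨m'', r''⟩ <;> simp only [hrest] at h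
      · cases h; rfl
      · split_ifs at h <;> cases h
        · exact ih m r hrest
        · rfl
    · simp only [hx] at h
      simp at h
      exact ih m r h


-- generic stage lemma: a find? pass whose predicate characterises 'valid ∧ rank = i'
theorem pvFind_pick (staff : List (List (String × String))) (p : List (String × String) → Bool) (i : Int)
    (hp : ∀ m ∈ staff, p m = true ↔ (pvAFallbackPred m = true ∧ pvRank m = i))
    (hmin : ∀ m ∈ staff, pvAFallbackPred m = true → i ≤ pvRank m) :
    staff.find? p = match pvPick staff with
      | some (m, r) => if r = i then some m else none
      | none => none := by
  induction staff with
  | nil => simp [pvPick]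
  | cons x rest ih =>
    have hpx := hp x (by simp)
    have ihr := ih (fun m hm => hp m (List.mem_cons_of_mem _ hm))
      (fun m hm => hmin m (List.mem_cons_of_mem _ hm))
    simp only [List.find?_cons, pvPick]
    by_cases hx : pvAFallbackPred x = true
    · by_cases hrk : pvRank x = i
      · have hpx' : p x = true := hpx.mpr ⟨hx, hrk⟩
        rw [hpx']
        simp only [hx, if_pos]
        rcases hrest : pvPick rest with _ | ⟨m', r'⟩ <;> simp only [hrest]
        · simp [hrk]
        · have hm' := pvPick_mem rest m' r' hrest
          have hr' := pvPick_rank rest m' r' hrest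
          have : i ≤ r' := by
            have := hmin m' (List.mem_cons_of_mem _ hm'.1) hm'.2
            omega
          have hnlt : ¬ (r' < pvRank x) := by omega
          rw [if_neg hnlt]
          simp [hrk]
      · have hpx' : p x = false := by
          cases hpf : p x
          · rfl
          · exact absurd (hpx.mp hpf).2 hrk
        rw [hpx']
        simp only [hx, if_pos, Bool.false_eq_true, if_false]
        have hxmin : i ≤ pvRank x := hmin x (by simp) hx
        rcases hrest : pvPick rest with _ | ⟨m', r'⟩ <;> simp only [hrest] at ihr ⊢
        · rw [ihr, if_neg hrk]
        · rw [ihr]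
          have hm' := pvPick_mem rest m' r' hrest
          have hr'2 := pvPick_rank rest m' r' hrest
          have : i ≤ r' := by
            have := hmin m' (List.mem_cons_of_mem _ hm'.1) hm'.2
            omega
          split_ifs <;> simp_all <;> omega
    · have hpx' : p x = false := by
        cases hpf : p x
        · rfl
        · exact absurd (hpx.mp hpf).1 hx
      rw [hpx']
      simp only [hx, Bool.false_eq_true, if_false]
      exact ihr

theorem pvB_run (staff : List (List (String × String))) (b : List (String × String)) (rb : Int)
    (hb : pvRank b = rb) :
    staff.foldl pvBStep (some b, some rb) = match pvPick staff with
      | none => (some b, some rb)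
      | some (m', r') => if r' < rb then (some m', some r') else (some b, some rb) := by
  induction staff generalizing b rb with
  | nil => simp [pvPick]
  | cons x rest ih =>
    simp only [List.foldl_cons, pvBStep_eq, pvPick]
    by_cases hx : pvAFallbackPred x = true
    · simp only [hx, if_pos]
      by_cases hlt : pvRank x < rb
      · rw [if_pos hlt]
        rw [ih x (pvRank x) rfl]
        rcases hrest : pvPick rest with _ | ⟨m', r'⟩ <;> simp only [hrest]
        · simp [hlt]
        · split_ifs <;> simp_all <;> omega
      · rw [if_neg hlt]
        rw [ih b rb hb]
        rcases hrest : pvPick rest with _ | ⟨m', r'⟩ <;> simp only [hrest]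
        · simp [hlt]
        · split_ifs <;> simp_all <;> omega
    · simp only [hx, Bool.false_eq_true, if_false]
      rw [ih b rb hb]

theorem pvB_char (staff : List (List (String × String))) :
    match_contact_from_staff_alt staff = (pvPick staff).map (·.1) := by
  induction staff with
  | nil => rfl
  | cons x rest ih =>
    unfold match_contact_from_staff_alt at ih ⊢
    simp only [List.foldl_cons, pvBStep_eq, pvPick]
    by_cases hx : pvAFallbackPred x = true
    · simp only [hx, if_pos]
      rw [pvB_run rest x (pvRank x) rfl]
      rcases hrest : pvPick rest with _ | ⟨m', r'⟩ <;> simp only [hrest]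
      · rfl
      · split_ifs <;> rfl
    · simp only [hx, Bool.false_eq_true, if_false]
      exact ih

theorem pvA_char (staff : List (List (String × String))) :
    match_contact_from_staff staff = (pvPick staff).map (·.1) := by
  rcases staff with _ | ⟨x, rest⟩
  · rfl
  set staff := x :: rest with hstaff
  unfold match_contact_from_staff
  rw [if_neg (by simp [hstaff])]
  simp only [pvATitleLoop]
  rcases hpick : pvPick staff with _ | ⟨m, r⟩
  · have hnone := pvPick_none staff hpick
    have hfind : ∀ pt, staff.find? (pvAPred pt) = none := fun pt =>
      List.find?_eq_none.mpr (fun m hm => by simp [pvAPred_false pt m (hnone m hm)])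
    rw [hfind, hfind, hfind, hfind]
    rw [List.find?_eq_none.mpr (fun m hm => by simp [hnone m hm])]
    rfl
  · have hmem := pvPick_mem staff m r hpick
    have hrank := pvPick_rank staff m r hpick
    have hmin := pvPick_min staff m r hpick
    have hr0 : 0 ≤ r := by have := pvRank_nonneg m; omega
    have hr4 : r ≤ 4 := by have := pvRank_le m; omega
    have h0 := pvFind_pick staff (pvAPred "director of operations") 0
      (fun m' _ => pvAPred_iff0 m')
      (fun m' _ _ => pvRank_nonneg m')
    rw [hpick] at h0
    replace h0 : List.find? (pvAPred "director of operations") staff = (if r = 0 then some m else none) := h0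
    rw [h0]
    by_cases he0 : r = 0
    · simp [he0]
    rw [if_neg he0]
    have hmin1 : ∀ m' ∈ staff, pvAFallbackPred m' = true → 1 ≤ pvRank m' := by
      intro m' hm' hv'; have := hmin m' hm' hv'; omega
    have h1 := pvFind_pick staff (pvAPred "assistant coach") 1
      (fun m' hm' => pvAPred_iff1 m' (hmin1 m' hm')) hmin1
    rw [hpick] at h1
    replace h1 : List.find? (pvAPred "assistant coach") staff = (if r = 1 then some m else none) := h1
    rw [h1]
    by_cases he1 : r = 1
    · simp [he1]
    rw [if_neg he1]
    have hmin2 : ∀ m' ∈ staff, pvAFallbackPred m' = true → 2 ≤ pvRank m' := by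
      intro m' hm' hv'; have := hmin m' hm' hv'; omega
    have h2 := pvFind_pick staff (pvAPred "associate head") 2
      (fun m' hm' => pvAPred_iff2 m' (hmin2 m' hm')) hmin2
    rw [hpick] at h2
    replace h2 : List.find? (pvAPred "associate head") staff = (if r = 2 then some m else none) := h2
    rw [h2]
    by_cases he2 : r = 2
    · simp [he2]
    rw [if_neg he2]
    have hmin3 : ∀ m' ∈ staff, pvAFallbackPred m' = true → 3 ≤ pvRank m' := by
      intro m' hm' hv'; have := hmin m' hm' hv'; omega
    have h3 := pvFind_pick staff (pvAPred "head coach") 3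
      (fun m' hm' => pvAPred_iff3 m' (hmin3 m' hm')) hmin3
    rw [hpick] at h3
    replace h3 : List.find? (pvAPred "head coach") staff = (if r = 3 then some m else none) := h3
    rw [h3]
    by_cases he3 : r = 3
    · simp [he3]
    rw [if_neg he3]
    have hr : r = 4 := by omega
    have hmin4 : ∀ m' ∈ staff, pvAFallbackPred m' = true → 4 ≤ pvRank m' := by
      intro m' hm' hv'; have := hmin m' hm' hv'; omega
    have h4 := pvFind_pick staff pvAFallbackPred 4
      (fun m' hm' => by
        constructor
        · intro hv'
          refine ⟨hv', ?_⟩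
          have := hmin4 m' hm' hv'
          have := pvRank_le m'
          omega
        · exact fun hh => hh.1)
      hmin4
    rw [hpick] at h4
    replace h4 : List.find? pvAFallbackPred staff = (if r = 4 then some m else none) := h4
    rw [h4, if_pos hr]
    rfl

-- ===== VERDICT (by name: the statement is the Claim_ definition above) =====
theorem match_contact_from_staff_spec : Claim_equal_match_contact_from_staff := by
  intro staff _
  unfold Spec_match_contact_from_staff
  rw [pvA_char, pvB_char]
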